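-- pv_equiv track=rewrite | github.com/borjaguanchesicilia/Algoritmos-de-cifrado | Cifrado-AES/multiplicacion.py | desplazamientos
-- ===== SOURCE A (Python) =====
-- def desplazamientos(byte1, byte2, byteAlgoritmo):
--
--     desplazamiento = 0
--     for i in range(len(byte2)):
--         if byte2[i] == "1":
--             desplazamiento = i
--             break
--
--     desplazamiento = 7 - desplazamiento
--
--     valor = byte1
--     iteracion = 0
--     for i in range(desplazamiento):
--         if valor[0] == "1": # Desplazamos y sumamos byte Snow3G | AES
--             valor = valor[1:]
--             valor = valor + "0"
--             valor = int(valor, 2) ^ int(byteAlgoritmo, 2)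
--             valor = completar(str(bin(valor)[2:]))
--         else: # Desplazamos
--             valor = valor[1:]
--             valor = valor + "0"
--         iteracion = iteracion + 1
--
--     return valor
--
-- def completar(valor):
--
--     while len(valor) < 8:
--         valor = "0" + valor
--
--     return valor
-- ===== SOURCE B (Python) =====
-- def desplazamientos(byte1, byte2, byteAlgoritmo):
--     # GF(2^8) multiply step on a textual bit register: shift byte1 left by
--     # k = 7 - (position of byte2's leading 1), folding the algorithm byte in
--     # whenever a 1 bit leaves the register -- computed in one go: locate the
--     # first outgoing 1, then finish numerically with one product and one
--     # top-down reduction by the 9-bit polynomial 0x100 | byteAlgoritmo.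
--     k = min(max(7 - byte2.find("1"), 0), 7)
--     i = byte1[:k].find("1")
--     if i == -1:
--         # no 1 ever leaves the register: a plain zero-filled left shift
--         return (byte1 + "0" * k)[k:]
--     # the first 1 leaves after i+1 shifts: drop it and XOR the byte in
--     v = int(byte1[i + 1:] + "0" * (i + 1), 2) ^ int(byteAlgoritmo, 2)
--     # the remaining shifts act on an 8-bit value: multiply, then reduce
--     m = 0x100 | int(byteAlgoritmo, 2)
--     p = v << (k - i - 1)
--     for b in range(p.bit_length() - 1, 7, -1):
--         if (p >> b) & 1:
--             p ^= m << (b - 8)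
--     return format(p, "08b")
-- ===== Notes on version B (the rewrite author's own statement) =====
-- stated objective: faster
-- what changed: B replaces A's per-step shift/parse/XOR/re-pad loop by locating the first outgoing 1 bit with str.find, taking one string slice for the pure-shift part, and finishing numerically with a single product reduced top-down by the 9-bit polynomial (one parse and one format instead of one per step, and no per-character Python loop over byte2); Pre_ excludes inputs where A raises and, once a parse is reached, restricts byte1/byteAlgoritmo to plain 0/1 strings of at most 8 bits (the 8-bit register domain the function is written for).
-- outside the precondition, e.g. on desplazamientos('1', '', '100000000'): A returns '100000000', B returns '00000000'; on desplazamientos('a1', '', '1'): A returns '00100000', B returns '00100000'; on desplazamientos('', '0', '1'): A raises IndexError, B returns ''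
import Mathlib
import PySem

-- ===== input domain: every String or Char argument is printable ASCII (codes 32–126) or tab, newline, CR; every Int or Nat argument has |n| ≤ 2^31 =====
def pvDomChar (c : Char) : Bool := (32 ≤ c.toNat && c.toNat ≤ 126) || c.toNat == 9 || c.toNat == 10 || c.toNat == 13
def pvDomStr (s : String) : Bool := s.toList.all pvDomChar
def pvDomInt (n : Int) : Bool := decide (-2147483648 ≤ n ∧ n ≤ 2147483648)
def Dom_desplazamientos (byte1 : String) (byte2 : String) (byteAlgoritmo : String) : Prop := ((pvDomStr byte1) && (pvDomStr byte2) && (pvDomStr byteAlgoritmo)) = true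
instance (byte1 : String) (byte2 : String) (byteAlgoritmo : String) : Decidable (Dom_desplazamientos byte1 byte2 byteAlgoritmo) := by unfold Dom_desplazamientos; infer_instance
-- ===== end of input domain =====

-- B replaces A's per-step shift/parse/XOR/re-pad loop by one slice for the pure-shift part
-- and one product reduced top-down by the 9-bit polynomial; objective: faster (measured).

-- ===== shared low-level helpers (both Pythons call int(s,2) and format binary) =====

-- port of int(s, 2): exact on the plain '0'/'1' strings, which is all Pre_ admits at a parse
def pvBinVal (l : List Char) : ℕ := l.foldl (fun a c => 2 * a + (if c = '1' then 1 else 0)) 0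

-- binary digits of n, most significant first, [] for 0
def pvBits (n : ℕ) : List Char :=
  if n = 0 then [] else pvBits (n / 2) ++ [if n % 2 = 1 then '1' else '0']
decreasing_by exact Nat.div_lt_self (Nat.pos_of_ne_zero (by assumption)) (by norm_num)

-- port of bin(n)[2:] for n ≥ 0 (all values both programs format are ≥ 0 under Pre_)
def pvBin (n : ℕ) : List Char := if n = 0 then ['0'] else pvBits n

-- ===== PORT A =====

-- the first for-loop: 'desplazamiento' stays 0 when byte2 has no '1'
def firstOne : List Char → ℕ → ℕ
  | [], _ => 0
  | c :: r, i => if c = '1' then i else firstOne r (i + 1)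

def completar (l : List Char) : List Char :=
  if l.length < 8 then completar ('0' :: l) else l
termination_by 8 - l.length
decreasing_by simp; omega

-- one iteration of A's main loop
def aStep (algo : List Char) (valor : List Char) : List Char :=
  match valor with
  | [] => []  -- Python's valor[0] raises IndexError here; Pre_ admits no input reaching this
  | c :: rest =>
    if c = '1' then completar (pvBin (pvBinVal (rest ++ ['0']) ^^^ pvBinVal algo))
    else rest ++ ['0']

def aIter (algo : List Char) (valor : List Char) : ℕ → List Char
  | 0 => valor
  | n + 1 => aIter algo (aStep algo valor) n

def desplazamientos (byte1 : String) (byte2 : String) (byteAlgoritmo : String) : String :=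
  let d : ℤ := 7 - (firstOne byte2.toList 0 : ℤ)
  -- range(d) runs d times (0 times when d ≤ 0)
  String.ofList (aIter byteAlgoritmo.toList byte1.toList d.toNat)

-- ===== PORT B =====

-- B's reduction loop: for b in range(p.bit_length()-1, 7, -1): if (p >> b) & 1: p ^= m << (b-8)
def redLoop (M : ℕ) (p : ℕ) (b : ℕ) : ℕ :=
  if b < 8 then p
  else redLoop M (if (p >>> b) &&& 1 = 1 then p ^^^ (M <<< (b - 8)) else p) (b - 1)
termination_by b
decreasing_by simp; omega

def desplazamientos_alt (byte1 : String) (byte2 : String) (byteAlgoritmo : String) : String :=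
  let k : ℤ := min (max (7 - PySem.Str.find byte2 "1") 0) 7
  let l1 := byte1.toList
  -- byte1[:k] with 0 ≤ k: take k
  let i : ℤ := PySem.Chars.find (l1.take k.toNat) ['1']
  if i = -1 then
    -- (byte1 + "0"*k)[k:]
    String.ofList ((l1 ++ List.replicate k.toNat '0').drop k.toNat)
  else
    let la := byteAlgoritmo.toList
    -- int(byte1[i+1:] + "0"*(i+1), 2) ^ int(byteAlgoritmo, 2)
    let v := pvBinVal (l1.drop (i.toNat + 1) ++ List.replicate (i.toNat + 1) '0') ^^^ pvBinVal la
    let m := 256 ||| pvBinVal la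
    let p := v <<< (k.toNat - i.toNat - 1)
    let r := redLoop m p (Nat.size p - 1)  -- p.bit_length() = Nat.size p
    -- format(r, "08b")
    String.ofList (List.replicate (8 - (pvBin r).length) '0' ++ pvBin r)

-- ===== PRECONDITION & SPEC =====

-- Pre_ excludes the inputs where A raises (empty byte1 reached with a positive shift count,
-- or a string int(_,2) cannot parse reaching a parse) and, whenever the loop does reach a
-- parse, restricts byte1 and byteAlgoritmo to plain '0'/'1' strings of at most 8 bits —
-- the 8-bit register domain the function is written for.
def Pre_desplazamientos (byte1 : String) (byte2 : String) (byteAlgoritmo : String) : Prop :=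
  let idx := (byte2.toList.findIdx? (· == '1')).getD 0
  let l1 := byte1.toList
  7 ≤ idx ∨
    (l1 ≠ [] ∧
      ('1' ∉ l1.take (7 - idx) ∨
        (l1.all (fun c => c == '0' || c == '1') = true ∧ l1.length ≤ 8 ∧
          byteAlgoritmo.toList ≠ [] ∧ byteAlgoritmo.toList.all (fun c => c == '0' || c == '1') = true ∧
          (byteAlgoritmo.toList.dropWhile (· == '0')).length ≤ 8)))
instance (byte1 : String) (byte2 : String) (byteAlgoritmo : String) : Decidable (Pre_desplazamientos byte1 byte2 byteAlgoritmo) := by unfold Pre_desplazamientos; infer_instance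

def pvWitness_desplazamientos : String × String × String := ("10110011", "0001", "00011011")

def Spec_desplazamientos (byte1 : String) (byte2 : String) (byteAlgoritmo : String) (out : String) : Prop := out = desplazamientos_alt byte1 byte2 byteAlgoritmo
instance (byte1 : String) (byte2 : String) (byteAlgoritmo : String) (out : String) : Decidable (Spec_desplazamientos byte1 byte2 byteAlgoritmo out) := by unfold Spec_desplazamientos; infer_instance

-- ===== CLAIM (what is proved, stated in full; the proofs are below) =====
def Claim_equal_desplazamientos : Prop := ∀ (byte1 : String) (byte2 : String) (byteAlgoritmo : String), Dom_desplazamientos byte1 byte2 byteAlgoritmo → Pre_desplazamientos byte1 byte2 byteAlgoritmo → Spec_desplazamientos byte1 byte2 byteAlgoritmo (desplazamientos byte1 byte2 byteAlgoritmo)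

-- ===== LEMMAS AND PROOFS =====

-- proof-side abbreviation: the 8-left-zero-padded binary rendering both programs emit
def pvPad8 (v : ℕ) : List Char := List.replicate (8 - (pvBin v).length) '0' ++ pvBin v

-- the numeric content of one iteration of A's loop on an 8-bit value
def gStep (m v : ℕ) : ℕ := if 128 ≤ v then (2 * (v - 128)) ^^^ m else 2 * v

def gIter (m : ℕ) : ℕ → ℕ → ℕ
  | 0, v => v
  | t + 1, v => gIter m t (gStep m v)

theorem pvBinVal_foldl (l : List Char) (a : ℕ) :
    l.foldl (fun a c => 2 * a + (if c = '1' then 1 else 0)) a = a * 2 ^ l.length + pvBinVal l := by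
  induction l generalizing a with
  | nil => simp [pvBinVal]
  | cons c r ih =>
    simp only [List.foldl_cons, List.length_cons, pvBinVal]
    rw [ih, ih]
    ring

theorem pvBinVal_append (a b : List Char) :
    pvBinVal (a ++ b) = pvBinVal a * 2 ^ b.length + pvBinVal b := by
  unfold pvBinVal
  rw [List.foldl_append, pvBinVal_foldl]
  rfl

theorem pvBinVal_cons (c : Char) (r : List Char) :
    pvBinVal (c :: r) = (if c = '1' then 1 else 0) * 2 ^ r.length + pvBinVal r := by
  have : (c :: r) = [c] ++ r := rfl
  rw [this, pvBinVal_append]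
  simp [pvBinVal]

theorem pvBinVal_zeros (l : List Char) (h : ∀ c ∈ l, c ≠ '1') : pvBinVal l = 0 := by
  induction l with
  | nil => rfl
  | cons c r ih =>
    rw [pvBinVal_cons, if_neg (h c (by simp)), ih (fun x hx => h x (by simp [hx]))]
    simp

theorem pvBinVal_lt (l : List Char) : pvBinVal l < 2 ^ l.length := by
  induction l with
  | nil => simp [pvBinVal]
  | cons c r ih =>
    rw [pvBinVal_cons]
    have : (if c = '1' then 1 else 0) ≤ 1 := by split <;> omega
    have h2 : (2:ℕ) ^ (c :: r).length = 2 ^ r.length + 2 ^ r.length := by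
      simp [List.length_cons, pow_succ]; ring
    simp only [List.length_cons] at *
    nlinarith [ih]

theorem pvBits_val : ∀ n, pvBinVal (pvBits n) = n := by
  intro n
  induction n using Nat.strong_induction_on with
  | _ n ih =>
    rw [pvBits]
    by_cases h : n = 0
    · simp [h, pvBinVal]
    · rw [if_neg h, pvBinVal_append, ih (n / 2) (Nat.div_lt_self (Nat.pos_of_ne_zero h) (by norm_num))]
      have : pvBinVal [if n % 2 = 1 then '1' else '0'] = n % 2 := by
        rcases Nat.mod_two_eq_zero_or_one n with h2 | h2 <;> simp [h2, pvBinVal]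
      rw [this]
      simp only [List.length_singleton, pow_one]
      omega

theorem pvBin_val (n : ℕ) : pvBinVal (pvBin n) = n := by
  rw [pvBin]
  by_cases h : n = 0
  · simp [h, pvBinVal]
  · rw [if_neg h, pvBits_val]

theorem pvBits_len_le : ∀ t n, n < 2 ^ t → (pvBits n).length ≤ t := by
  intro t
  induction t with
  | zero => intro n h; interval_cases n; rw [pvBits]; simp
  | succ t ih =>
    intro n h
    have hp : (2:ℕ) ^ (t + 1) = 2 * 2 ^ t := by ring
    rw [pvBits]
    by_cases h0 : n = 0
    · simp [h0]
    · rw [if_neg h0]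
      have := ih (n / 2) (by omega)
      simp only [List.length_append, List.length_singleton]
      omega

theorem pvBits_len_ge : ∀ t n, 2 ^ t ≤ n → t < (pvBits n).length := by
  intro t
  induction t with
  | zero =>
    intro n h
    rw [pvBits, if_neg (by omega)]
    simp
  | succ t ih =>
    intro n h
    have hp : (2:ℕ) ^ (t + 1) = 2 * 2 ^ t := by ring
    have h0 : (0:ℕ) < 2 ^ t := Nat.pow_pos (by norm_num : (0:ℕ) < 2)
    rw [pvBits, if_neg (by omega : ¬ n = 0)]
    have := ih (n / 2) (by omega)
    simp only [List.length_append, List.length_singleton]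
    omega

theorem pvBin_len_le (n : ℕ) (h : n < 256) : (pvBin n).length ≤ 8 := by
  rw [pvBin]
  by_cases h0 : n = 0
  · simp [h0]
  · rw [if_neg h0]; exact pvBits_len_le 8 n h

theorem pvBits_head : ∀ n, n ≠ 0 → ∃ r, pvBits n = '1' :: r := by
  intro n
  induction n using Nat.strong_induction_on with
  | _ n ih =>
    intro h
    rw [pvBits, if_neg h]
    by_cases h2 : n / 2 = 0
    · have : n = 1 := by omega
      subst this
      exact ⟨[], by rw [pvBits]; norm_num⟩
    · obtain ⟨r, hr⟩ := ih (n / 2) (Nat.div_lt_self (Nat.pos_of_ne_zero h) (by norm_num)) h2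
      exact ⟨r ++ [if n % 2 = 1 then '1' else '0'], by rw [hr]; rfl⟩

theorem pvBits_binary : ∀ n, ∀ c ∈ pvBits n, c = '0' ∨ c = '1' := by
  intro n
  induction n using Nat.strong_induction_on with
  | _ n ih =>
    intro c hc
    rw [pvBits] at hc
    by_cases h : n = 0
    · simp [h] at hc
    · rw [if_neg h] at hc
      rcases List.mem_append.1 hc with h1 | h1
      · exact ih (n / 2) (Nat.div_lt_self (Nat.pos_of_ne_zero h) (by norm_num)) c h1
      · simp at h1; split at h1 <;> simp [h1]

theorem pvBin_binary (n : ℕ) : ∀ c ∈ pvBin n, c = '0' ∨ c = '1' := by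
  intro c hc
  rw [pvBin] at hc
  split at hc
  · simp at hc; simp [hc]
  · exact pvBits_binary n c hc

theorem completar_eq : ∀ l : List Char, l.length ≤ 8 →
    completar l = List.replicate (8 - l.length) '0' ++ l := by
  suffices h : ∀ n, ∀ l : List Char, 8 - l.length ≤ n → l.length ≤ 8 →
      completar l = List.replicate (8 - l.length) '0' ++ l by
    intro l hl; exact h 8 l (by omega) hl
  intro n
  induction n with
  | zero =>
    intro l h1 h2
    have : l.length = 8 := by omega
    rw [completar, if_neg (by omega), this]
    simp
  | succ n ih =>
    intro l h1 h2
    by_cases hlt : l.length < 8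
    · rw [completar, if_pos hlt, ih ('0' :: l) (by simp; omega) (by simp; omega)]
      have h8 : 8 - l.length = (8 - ('0'::l).length) + 1 := by simp; omega
      rw [h8, List.replicate_succ']
      simp
    · rw [completar, if_neg hlt]
      have : l.length = 8 := by omega
      rw [this]; simp

theorem pvPad8_len (v : ℕ) (h : v < 256) : (pvPad8 v).length = 8 := by
  have := pvBin_len_le v h
  rw [pvPad8, List.length_append, List.length_replicate]
  omega

theorem pvPad8_val (v : ℕ) : pvBinVal (pvPad8 v) = v := by
  rw [pvPad8, pvBinVal_append, pvBinVal_zeros (List.replicate (8 - (pvBin v).length) '0') (by intro c hc; rw [List.eq_of_mem_replicate hc]; decide), pvBin_val]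
  simp

theorem pvPad8_binary (v : ℕ) : ∀ c ∈ pvPad8 v, c = '0' ∨ c = '1' := by
  intro c hc
  rcases List.mem_append.1 hc with h | h
  · exact Or.inl (List.eq_of_mem_replicate h)
  · exact pvBin_binary v c h

theorem completar_pvBin (v : ℕ) (h : v < 256) : completar (pvBin v) = pvPad8 v :=
  completar_eq _ (pvBin_len_le v h)

theorem pvBinVal_inj : ∀ l₁ l₂ : List Char, (∀ c ∈ l₁, c = '0' ∨ c = '1') →
    (∀ c ∈ l₂, c = '0' ∨ c = '1') → l₁.length = l₂.length →
    pvBinVal l₁ = pvBinVal l₂ → l₁ = l₂ := by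
  intro l₁
  induction l₁ with
  | nil => intro l₂ _ _ hlen _; cases l₂ <;> simp_all
  | cons c₁ r₁ ih =>
    intro l₂ hb₁ hb₂ hlen hval
    cases l₂ with
    | nil => simp at hlen
    | cons c₂ r₂ =>
      rw [pvBinVal_cons, pvBinVal_cons] at hval
      have hr : r₁.length = r₂.length := by simpa using hlen
      have h₁ := pvBinVal_lt r₁
      have h₂ := pvBinVal_lt r₂
      rw [hr] at hval h₁
      have hc : c₁ = c₂ := by
        by_cases hc₁ : c₁ = '1' <;> by_cases hc₂ : c₂ = '1'
        · rw [hc₁, hc₂]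
        · rw [if_pos hc₁, if_neg hc₂] at hval; omega
        · rw [if_neg hc₁, if_pos hc₂] at hval; omega
        · rcases hb₁ c₁ (by simp) with h | h <;> rcases hb₂ c₂ (by simp) with h' | h' <;>
            simp_all
      subst hc
      have hval' : pvBinVal r₁ = pvBinVal r₂ := by
        split_ifs at hval <;> omega
      rw [ih r₂ (fun x hx => hb₁ x (by simp [hx])) (fun x hx => hb₂ x (by simp [hx])) hr hval']

theorem gStep_lt (m v : ℕ) (hm : m < 256) (hv : v < 256) : gStep m v < 256 := by
  rw [gStep]
  split
  · exact Nat.xor_lt_two_pow (n := 8) (by omega) (by omega)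
  · omega

theorem pvPad8_head_lo (v : ℕ) (hv : v < 128) :
    pvPad8 v = '0' :: (List.replicate (8 - (pvBin v).length - 1) '0' ++ pvBin v) := by
  have hlen : (pvBin v).length ≤ 7 := by
    rw [pvBin]
    by_cases h0 : v = 0
    · simp [h0]
    · rw [if_neg h0]; exact pvBits_len_le 7 v (by omega)
  rw [pvPad8]
  have h8 : 8 - (pvBin v).length = (8 - (pvBin v).length - 1) + 1 := by omega
  rw [h8, List.replicate_succ]
  simp

theorem pvPad8_head_hi (v : ℕ) (hv : 128 ≤ v) (hv' : v < 256) :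
    ∃ r, pvPad8 v = '1' :: r ∧ r.length = 7 ∧ pvBinVal r = v - 128 := by
  have hne : v ≠ 0 := by omega
  have hlen8 : (pvBin v).length = 8 := by
    have h1 := pvBin_len_le v hv'
    have h2 : 7 < (pvBits v).length := pvBits_len_ge 7 v (by omega)
    rw [pvBin, if_neg hne] at h1 ⊢
    omega
  obtain ⟨r, hr⟩ : ∃ r, pvBin v = '1' :: r := by
    rw [pvBin, if_neg hne]; exact pvBits_head v hne
  refine ⟨r, ?_, ?_, ?_⟩
  · rw [pvPad8, hlen8, hr]; simp
  · have := hlen8; rw [hr] at this; simpa using this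
  · have hval := pvBin_val v
    rw [hr, pvBinVal_cons] at hval
    have hrlen : r.length = 7 := by have := hlen8; rw [hr] at this; simpa using this
    rw [hrlen] at hval
    simp at hval
    omega

theorem aStep_pad8 (algo : List Char) (v : ℕ) (hm : pvBinVal algo < 256) (hv : v < 256) :
    aStep algo (pvPad8 v) = pvPad8 (gStep (pvBinVal algo) v) := by
  by_cases hhi : 128 ≤ v
  · obtain ⟨r, hr, hrlen, hrval⟩ := pvPad8_head_hi v hhi hv
    rw [hr]
    show aStep algo ('1' :: r) = _
    rw [aStep, if_pos rfl]
    have hu : pvBinVal (r ++ ['0']) = 2 * (v - 128) := by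
      rw [pvBinVal_append, hrval]
      simp [pvBinVal]
      ring
    rw [hu, gStep, if_pos hhi]
    exact completar_pvBin _ (Nat.xor_lt_two_pow (n := 8) (by omega) (by omega))
  · rw [pvPad8_head_lo v (by omega)]
    rw [aStep, if_neg (by decide)]
    -- both sides are 8-char binary strings with value 2*v: use uniqueness
    have hv2 : 2 * v < 256 := by omega
    apply pvBinVal_inj
    · intro c hc
      rcases List.mem_append.1 hc with h | h
      · rcases List.mem_append.1 h with h' | h'
        · exact Or.inl (List.eq_of_mem_replicate h')
        · exact pvBin_binary v c h'
      · simp at h; simp [h]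
    · exact pvPad8_binary _
    · have h1 : (pvPad8 v).length = 8 := pvPad8_len v hv
      rw [pvPad8_head_lo v (by omega)] at h1
      simp at h1 ⊢
      rw [pvPad8_len _ (by rw [gStep, if_neg hhi]; omega)] at *
      omega
    · rw [pvBinVal_append]
      have hval : pvBinVal (List.replicate (8 - (pvBin v).length - 1) '0' ++ pvBin v) = v := by
        rw [pvBinVal_append, pvBinVal_zeros (List.replicate (8 - (pvBin v).length - 1) '0') (by intro c hc; rw [List.eq_of_mem_replicate hc]; decide), pvBin_val]
        simp
      rw [hval, pvPad8_val, gStep, if_neg hhi]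
      simp [pvBinVal]
      ring

theorem aIter_pad8 (algo : List Char) (hm : pvBinVal algo < 256) :
    ∀ t v, v < 256 → aIter algo (pvPad8 v) t = pvPad8 (gIter (pvBinVal algo) t v) := by
  intro t
  induction t with
  | zero => intro v _; rfl
  | succ t ih =>
    intro v hv
    show aIter algo (aStep algo (pvPad8 v)) t = _
    rw [aStep_pad8 algo v hm hv, gIter, ih _ (gStep_lt _ _ hm hv)]

theorem aIter_add (algo : List Char) : ∀ (a b : ℕ) (l : List Char),
    aIter algo l (a + b) = aIter algo (aIter algo l a) b := by
  intro a
  induction a with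
  | zero => intro b l; rw [Nat.zero_add]; rfl
  | succ a ih =>
    intro b l
    have h1 : a + 1 + b = (a + b) + 1 := by omega
    rw [h1]
    show aIter algo (aStep algo l) (a + b) = _
    rw [ih]
    rfl

theorem aIter_shift (algo : List Char) : ∀ (n : ℕ) (l : List Char), l ≠ [] →
    '1' ∉ l.take n → aIter algo l n = l.drop n ++ List.replicate (min n l.length) '0' := by
  intro n
  induction n with
  | zero => intro l _ _; simp [aIter]
  | succ n ih =>
    intro l hne hmem
    cases l with
    | nil => exact absurd rfl hne
    | cons c r =>
      have htake : (c :: r).take (n + 1) = c :: r.take n := by simp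
      rw [htake] at hmem
      have hc : c ≠ '1' := fun h => hmem (by simp [h])
      have hr : '1' ∉ r.take n := fun h => hmem (by simp [h])
      show aIter algo (aStep algo (c :: r)) n = _
      rw [aStep]
      rw [if_neg hc]
      rw [ih (r ++ ['0']) (by simp) ?hm]
      case hm =>
        intro hmem'
        rw [List.take_append] at hmem'
        rcases List.mem_append.1 hmem' with h | h
        · exact hr h
        · have := List.mem_of_mem_take h
          simp at this
      rw [List.drop_append]
      by_cases h : n ≤ r.length
      · have h0 : n - r.length = 0 := by omega
        rw [h0]
        simp only [List.drop_zero, List.length_append, List.length_cons, List.length_nil]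
        have hmin1 : min n (r.length + (0 + 1)) = n := by omega
        have hmin2 : min (n + 1) (r.length + 1) = n + 1 := by omega
        rw [hmin1, hmin2, List.drop_succ_cons, List.append_assoc]
        simp [List.replicate_succ]
      · have hd1 : r.drop n = [] := List.drop_eq_nil_of_le (by omega)
        have hd2 : List.drop (n - r.length) ['0'] = [] := List.drop_eq_nil_of_le (by simp; omega)
        rw [hd1, hd2, List.drop_succ_cons, hd1]
        simp only [List.nil_append, List.length_append, List.length_cons, List.length_nil]
        have hmin1 : min n (r.length + (0 + 1)) = r.length + 1 := by omega
        have hmin2 : min (n + 1) (r.length + 1) = r.length + 1 := by omega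
        rw [hmin1, hmin2]

-- B's pure-shift slice equals A's shifted register
theorem drop_append_replicate (l : List Char) (k : ℕ) :
    (l ++ List.replicate k '0').drop k = l.drop k ++ List.replicate (min k l.length) '0' := by
  rw [List.drop_append, List.drop_replicate]
  congr 2
  omega

-- ===== index / find bridges =====

theorem singleton_prefix_iff (c : Char) (t : List Char) : [c] <+: t ↔ t.head? = some c := by
  constructor
  · rintro ⟨s, rfl⟩; rfl
  · intro h
    cases t with
    | nil => simp at h
    | cons x r =>
      simp at h
      exact ⟨r, by simp [h]⟩

theorem chars_find_one (l : List Char) :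
    PySem.Chars.find l ['1'] =
      (match l.findIdx? (· == '1') with
       | some n => (n : ℤ)
       | none => -1) := by
  rcases h : l.findIdx? (· == '1') with _ | n
  · simp only []
    rw [PySem.Chars.find_eq_neg_one_iff]
    intro hinf
    have hmem : '1' ∈ l := hinf.subset (by simp)
    have := List.findIdx?_eq_none_iff.1 h '1' hmem
    simp at this
  · simp only []
    obtain ⟨hn, hget, hmin⟩ := List.findIdx?_eq_some_iff_getElem.1 h
    simp only [beq_iff_eq] at hget
    have hpre : ['1'] <+: l.drop n := by
      rw [singleton_prefix_iff, List.head?_drop, List.getElem?_eq_getElem hn, hget]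
    have hne : PySem.Chars.find l ['1'] ≠ -1 := by
      rw [ne_eq, PySem.Chars.find_eq_neg_one_iff, not_not]
      exact hpre.isInfix.trans (List.drop_suffix n l).isInfix
    obtain ⟨hle, hpre', hmin'⟩ := PySem.Chars.findFrom_natCast_spec l ['1'] 0 (by simp)
      (by simpa [PySem.Chars.findFrom_zero] using hne)
    simp only [Nat.cast_zero, PySem.Chars.findFrom_zero] at hle hpre' hmin'
    set f := PySem.Chars.find l ['1'] with hfdef
    have hget' : l[f.toNat]? = some '1' := by
      rw [← List.head?_drop]
      rw [singleton_prefix_iff] at hpre'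
      exact hpre'
    have h1 : ¬ f.toNat < n := by
      intro hlt
      have := hmin (f.toNat) hlt
      rw [List.getElem?_eq_getElem (by omega)] at hget'
      simp at hget' this
      exact this hget'
    have h2 : ¬ n < f.toNat := by
      intro hlt
      exact hmin' n (by omega) hlt hpre
    have : f.toNat = n := by omega
    omega

theorem firstOne_eq : ∀ (l : List Char) (a : ℕ),
    firstOne l a =
      (match l.findIdx? (· == '1') with
       | some n => a + n
       | none => 0) := by
  intro l
  induction l with
  | nil => intro a; simp [firstOne]
  | cons c r ih =>
    intro a
    rw [firstOne, List.findIdx?_cons]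
    by_cases hc : c = '1'
    · simp [hc]
    · have hcb : (c == '1') = false := by simp [hc]
      rw [if_neg hc, hcb, if_neg (by simp), ih (a + 1)]
      rcases h : r.findIdx? (· == '1') with _ | n
      · simp
      · simp only [Option.map_some]
        show a + 1 + n = a + (n + 1)
        omega

-- ===== Nat bit lemmas =====

theorem or_eq_xor_two_pow {a n : ℕ} (h : a < 2 ^ n) : 2 ^ n ||| a = 2 ^ n ^^^ a := by
  apply Nat.eq_of_testBit_eq
  intro i
  rcases eq_or_ne i n with rfl | hne
  · rw [Nat.testBit_or, Nat.testBit_xor, Nat.testBit_lt_two_pow h]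
    simp
  · rw [Nat.testBit_or, Nat.testBit_xor, Nat.testBit_two_pow_of_ne (by omega)]
    simp

theorem xor_two_pow_add {a n : ℕ} (h : a < 2 ^ n) : 2 ^ n ^^^ a = 2 ^ n + a := by
  rw [← or_eq_xor_two_pow h]
  have := Nat.two_pow_add_eq_or_of_lt h 1
  simpa using this.symm

theorem add_two_pow_xor {a n : ℕ} (h : a < 2 ^ n) : (2 ^ n + a) ^^^ 2 ^ n = a := by
  rw [← xor_two_pow_add h, Nat.xor_comm (2^n) a, Nat.xor_assoc]
  simp

-- ===== redLoop lemmas =====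

theorem redLoop_base (M p b : ℕ) (h : b < 8) : redLoop M p b = p := by
  rw [redLoop, if_pos h]

theorem redLoop_skip (M p b : ℕ) (h8 : 8 ≤ b) (hlt : p < 2 ^ b) :
    redLoop M p b = redLoop M p (b - 1) := by
  rw [redLoop, if_neg (by omega)]
  have : p >>> b = 0 := by
    rw [Nat.shiftRight_eq_div_pow]
    exact Nat.div_eq_of_lt hlt
  rw [this]
  norm_num

theorem redLoop_ext (M p : ℕ) : ∀ (b c : ℕ), 7 ≤ c → c ≤ b → p < 2 ^ (c + 1) →
    redLoop M p b = redLoop M p c := by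
  intro b
  induction b with
  | zero => intro c h7 hc _; omega
  | succ b ih =>
    intro c h7 hc hp
    rcases eq_or_ne c (b + 1) with rfl | hne
    · rfl
    · have hcb : c ≤ b := by omega
      rw [redLoop_skip M p (b + 1) (by omega) (lt_of_lt_of_le hp (Nat.pow_le_pow_right (by norm_num) (by omega)))]
      simpa using ih c h7 hcb hp

theorem redLoop_gIter (m : ℕ) (hm : m < 256) :
    ∀ (t v : ℕ), v < 256 → redLoop (256 ||| m) (v <<< t) (t + 7) = gIter m t v := by
  intro t
  induction t with
  | zero =>
    intro v hv
    rw [redLoop_base _ _ _ (by omega)]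
    rfl
  | succ t ih =>
    intro v hv
    have hM : (256 : ℕ) ||| m = 256 ^^^ m := or_eq_xor_two_pow (n := 8) (by omega)
    rw [redLoop, if_neg (by omega)]
    have hsh : v <<< (t + 1) = (2 * v) <<< t := by
      rw [Nat.shiftLeft_eq, Nat.shiftLeft_eq, pow_succ]
      ring
    have hbit : (v <<< (t + 1)) >>> (t + 1 + 7) &&& 1 = v >>> 7 &&& 1 := by
      have : t + 1 + 7 = (t + 1) + 7 := by omega
      rw [this, Nat.shiftRight_add, Nat.shiftLeft_shiftRight]
    rw [hbit]
    have hb7 : v >>> 7 &&& 1 = v / 128 % 2 := by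
      rw [Nat.shiftRight_eq_div_pow, Nat.and_one_is_mod]
    by_cases hhi : 128 ≤ v
    · have hcond : v >>> 7 &&& 1 = 1 := by rw [hb7]; omega
      rw [if_pos hcond]
      have ht : t + 1 + 7 - 8 = t := by omega
      rw [ht, hM]
      have hstep : v <<< (t + 1) ^^^ (256 ^^^ m) <<< t = (gStep m v) <<< t := by
        have h2v : 2 * v = 2 ^ 8 + 2 * (v - 128) := by omega
        have h256 : (256:ℕ) = 2 ^ 8 := by norm_num
        have hxa : ((2:ℕ) ^ 8 + 2 * (v - 128)) ^^^ 2 ^ 8 = 2 * (v - 128) :=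
          add_two_pow_xor (by omega)
        have hinner : (2 * v) ^^^ (256 ^^^ m) = (2 * (v - 128)) ^^^ m := by
          rw [h256, h2v, ← Nat.xor_assoc, hxa]
        rw [hsh, ← Nat.shiftLeft_xor_distrib, gStep, if_pos hhi, hinner]
      rw [hstep, show t + 1 + 7 - 1 = t + 7 from by omega, ← hM]
      exact ih (gStep m v) (gStep_lt m v hm hv)
    · have hcond : ¬ (v >>> 7 &&& 1 = 1) := by rw [hb7]; omega
      rw [if_neg hcond, show t + 1 + 7 - 1 = t + 7 from by omega, hsh]
      have := ih (2 * v) (by omega)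
      rw [this]
      show gIter m t (2 * v) = gIter m (t + 1) v
      rw [gIter, gStep, if_neg hhi]

theorem take_no_one_of_min {l : List Char} {kN n : ℕ} (hn : n < min kN l.length)
    (hmin : ∀ i (h : i < n), ¬((l.take kN)[i]'(by simp; omega) == '1') = true) :
    '1' ∉ l.take n := by
  intro hmem
  obtain ⟨i, hi, hgi⟩ := List.getElem_of_mem hmem
  have hilen : i < n := by simp at hi; omega
  have : (l.take kN)[i]'(by simp; omega) = l[i]'(by simp at hi; omega) := List.getElem_take
  have h2 : (l.take n)[i]'hi = l[i]'(by simp at hi; omega) := List.getElem_take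
  exact hmin i hilen (by simp [this, h2 ▸ hgi])

-- ===== VERDICT (by name: the statement is the Claim_ definition above) =====
theorem desplazamientos_spec : Claim_equal_desplazamientos := by
  unfold Claim_equal_desplazamientos
  intro b1 b2 alg _hdom hpre
  unfold Spec_desplazamientos
  unfold Pre_desplazamientos at hpre
  unfold desplazamientos desplazamientos_alt
  dsimp only at hpre ⊢
  set l1 := b1.toList with hl1
  set l2 := b2.toList with hl2
  set la := alg.toList with hla
  set idx : ℕ := (l2.findIdx? (· == '1')).getD 0 with hidxdef
  have h1list : ("1" : String).toList = ['1'] := by decide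
  have hfind : PySem.Str.find b2 "1" =
      (match l2.findIdx? (· == '1') with
       | some n => (n : ℤ)
       | none => -1) := by
    rw [PySem.Str.find_eq, h1list, ← hl2, chars_find_one]
  have hfo : firstOne l2 0 = idx := by
    rw [firstOne_eq]
    rcases h : l2.findIdx? (· == '1') with _ | n <;> simp [hidxdef, h]
  -- both shift counts equal kN := 7 - idx (truncated subtraction)
  have hAcount : ((7 : ℤ) - (firstOne l2 0 : ℤ)).toNat = 7 - idx := by
    rw [hfo]; omega
  have hkB : (min (max (7 - PySem.Str.find b2 "1") 0) 7).toNat = 7 - idx := by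
    rw [hfind]
    rcases h : l2.findIdx? (· == '1') with _ | n
    · have : idx = 0 := by simp [hidxdef, h]
      simp only []
      omega
    · have : idx = n := by simp [hidxdef, h]
      simp only []
      omega
  rw [hAcount, hkB]
  set kN : ℕ := 7 - idx with hkNdef
  rcases hjs : (l1.take kN).findIdx? (· == '1') with _ | n
  · -- pure shift: '1' never reaches the front
    have hmem : '1' ∉ l1.take kN := by
      intro hx
      have := List.findIdx?_eq_none_iff.1 hjs '1' hx
      simp at this
    have hjfind : PySem.Chars.find (l1.take kN) ['1'] = -1 := by
      rw [chars_find_one, hjs]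
    rw [hjfind, if_pos rfl]
    by_cases hk0 : kN = 0
    · rw [hk0]
      simp [aIter]
    · have hne : l1 ≠ [] := by
        rcases hpre with h7 | ⟨hne, _⟩
        · omega
        · exact hne
      rw [aIter_shift la kN l1 hne hmem, drop_append_replicate]
  · -- reduction case
    have hmem : '1' ∈ l1.take kN := by
      obtain ⟨hn, hget, _⟩ := List.findIdx?_eq_some_iff_getElem.1 hjs
      simp only [beq_iff_eq] at hget
      exact hget ▸ List.getElem_mem hn
    have hkpos : kN ≠ 0 := by
      intro h; rw [h] at hmem; simp at hmem
    rcases hpre with h7 | ⟨hne, hrest⟩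
    · omega
    rcases hrest with hno | ⟨_, hL, _, _, hstrip⟩
    · exact absurd hmem hno
    -- value of byteAlgoritmo
    have hm : pvBinVal la < 256 := by
      have hsplit := List.takeWhile_append_dropWhile (p := (· == '0')) (l := la)
      have h0 : pvBinVal (la.takeWhile (· == '0')) = 0 := by
        apply pvBinVal_zeros
        intro c hc
        have h0c := List.mem_takeWhile_imp hc
        have : c = '0' := by simpa using h0c
        subst this
        decide
      calc pvBinVal la = pvBinVal (la.takeWhile (· == '0') ++ la.dropWhile (· == '0')) := by
            rw [hsplit]
        _ = pvBinVal (la.dropWhile (· == '0')) := by rw [pvBinVal_append, h0]; simp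
        _ < 2 ^ (la.dropWhile (· == '0')).length := pvBinVal_lt _
        _ ≤ 2 ^ 8 := Nat.pow_le_pow_right (by norm_num) hstrip
    obtain ⟨hnlen, hget, hmin⟩ := List.findIdx?_eq_some_iff_getElem.1 hjs
    have hnk : n < kN := by simp at hnlen; omega
    have hnl : n < l1.length := by simp at hnlen; omega
    have hgetn : l1[n] = '1' := by
      have : (l1.take kN)[n]'hnlen = l1[n]'hnl := List.getElem_take
      rw [this] at hget
      simpa using hget
    have hjfind : PySem.Chars.find (l1.take kN) ['1'] = (n : ℤ) := by
      rw [chars_find_one, hjs]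
    rw [hjfind, if_neg (by omega)]
    simp only [Int.toNat_natCast]
    set t : ℕ := kN - n - 1 with htdef
    set L : ℕ := l1.length with hLdef
    -- A: first n pure shifts
    have hshift : aIter la l1 n = l1.drop n ++ List.replicate n '0' := by
      rw [aIter_shift la n l1 hne (take_no_one_of_min (by simp; omega) hmin)]
      congr 1
      congr 1
      omega
    have hdropn : l1.drop n = '1' :: l1.drop (n + 1) := by
      rw [List.drop_eq_getElem_cons hnl, hgetn]
    -- the value after the first reducing step (B computes it directly)
    set u : ℕ := pvBinVal (l1.drop (n + 1) ++ List.replicate (n + 1) '0') with hudef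
    have hulen : (l1.drop (n + 1) ++ List.replicate (n + 1) '0').length = L := by
      simp; omega
    have huL : u < 2 ^ L := by rw [hudef, ← hulen]; exact pvBinVal_lt _
    have hu256 : u < 256 := lt_of_lt_of_le huL (by
      calc (2:ℕ) ^ L ≤ 2 ^ 8 := Nat.pow_le_pow_right (by norm_num) hL
      _ = 256 := by norm_num)
    set v1 : ℕ := u ^^^ pvBinVal la with hv1def
    have hv1 : v1 < 256 := Nat.xor_lt_two_pow (n := 8) (by omega) (by omega)
    -- A's loop = n shifts, one reducing step, t more numeric steps
    have hA : aIter la l1 kN = pvPad8 (gIter (pvBinVal la) t v1) := by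
      rw [show kN = n + (t + 1) from by omega, aIter_add, hshift, hdropn]
      show aIter la (aStep la ('1' :: (l1.drop (n+1) ++ List.replicate n '0'))) t = _
      rw [aStep]
      simp only [if_true]
      rw [List.append_assoc, ← List.replicate_succ', ← hudef, ← hv1def,
        completar_pvBin v1 hv1, aIter_pad8 la hm t v1 hv1]
    rw [hA]
    set p : ℕ := v1 <<< (kN - n - 1) with hpdef
    have hpt : p = v1 <<< t := by rw [hpdef, htdef]
    have hp : p < 2 ^ (t + 8) := by
      rw [hpt, Nat.shiftLeft_eq]
      have h2t : (0:ℕ) < 2 ^ t := Nat.pow_pos (by norm_num : (0:ℕ) < 2)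
      calc v1 * 2 ^ t < 256 * 2 ^ t := (Nat.mul_lt_mul_right h2t).mpr hv1
        _ = 2 ^ (t + 8) := by rw [pow_add]; ring
    have hred : redLoop (256 ||| pvBinVal la) p (Nat.size p - 1) = gIter (pvBinVal la) t v1 := by
      have hmain := redLoop_gIter (pvBinVal la) hm t v1 hv1
      rw [← hpt] at hmain
      by_cases hsz : Nat.size p ≤ 8
      · have hpp : p < 2 ^ 8 := Nat.size_le.1 hsz
        rw [redLoop_base _ _ _ (by omega)]
        rw [redLoop_ext (256 ||| pvBinVal la) p (t + 7) 7 (by norm_num) (by omega) (by simpa using hpp)] at hmain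
        rw [redLoop_base _ _ _ (by norm_num)] at hmain
        exact hmain
      · have hc7 : 7 ≤ Nat.size p - 1 := by omega
        have hcle : Nat.size p - 1 ≤ t + 7 := by
          have := Nat.size_le.2 hp
          omega
        have hplt : p < 2 ^ (Nat.size p - 1 + 1) := by
          have h1 : Nat.size p - 1 + 1 = Nat.size p := by omega
          rw [h1]
          exact Nat.lt_size_self p
        rw [redLoop_ext (256 ||| pvBinVal la) p (t + 7) (Nat.size p - 1) hc7 hcle hplt] at hmain
        exact hmain
    rw [hred]
    rfl
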